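-- pv_equiv track=rewrite | github.com/nutonomy/nuscenes-devkit | python-sdk/nuscenes/map_expansion/utils.py | get_disconnected_subtrees
-- ===== SOURCE A (Python) =====
-- from typing import List, Dict, Set
--
-- def get_disconnected_subtrees(connectivity: Dict[str, dict]) -> Set[str]:
--     """
--     Compute lanes or lane_connectors that are part of disconnected subtrees.
--     :param connectivity: The connectivity of the current NuScenesMap.
--     :return: The lane_tokens for lanes that are part of a disconnected subtree.
--     """
--     # Init.
--     connected = set()
--     pending = set()
--
--     # Add first lane.
--     all_keys = list(connectivity.keys())
--     first_key = all_keys[0]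
--     all_keys = set(all_keys)
--     pending.add(first_key)
--
--     while len(pending) > 0:
--         # Get next lane.
--         lane_token = pending.pop()
--         connected.add(lane_token)
--
--         # Add lanes connected to this lane.
--         if lane_token in connectivity:
--             incoming = connectivity[lane_token]['incoming']
--             outgoing = connectivity[lane_token]['outgoing']
--             inout_lanes = set(incoming + outgoing)
--             for other_lane_token in inout_lanes:
--                 if other_lane_token not in connected:
--                     pending.add(other_lane_token)
--
--     disconnected = all_keys - connected
--     assert len(disconnected) < len(connected), 'Error: Bad initialization chosen!'
--     return disconnected
-- ===== SOURCE B (Python) =====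
-- def get_disconnected_subtrees(connectivity):
--     """Round-based saturation: sweep the dict repeatedly, absorbing the
--     incoming/outgoing tokens of every already-connected key, until the
--     connected set stops growing; then the disconnected lanes are the keys
--     left outside it."""
--     keys = list(connectivity.keys())
--     connected = {keys[0]}
--     while True:
--         before = len(connected)
--         for token, edges in connectivity.items():
--             if token in connected:
--                 connected.update(edges['incoming'])
--                 connected.update(edges['outgoing'])
--         if len(connected) == before:
--             break
--     disconnected = {k for k in keys if k not in connected}
--     assert len(disconnected) < len(connected), 'Error: Bad initialization chosen!'
--     return disconnected
-- ===== Notes on version B (the rewrite author's own statement) =====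
-- stated objective: simpler
-- what changed: Replaces the worklist BFS (pending/connected sets with pop and per-neighbour membership tests) by a round-based saturation: sweep the whole dict repeatedly, absorbing the neighbours of every already-connected key, until the connected set stops growing, then filter the keys.
import Mathlib
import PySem

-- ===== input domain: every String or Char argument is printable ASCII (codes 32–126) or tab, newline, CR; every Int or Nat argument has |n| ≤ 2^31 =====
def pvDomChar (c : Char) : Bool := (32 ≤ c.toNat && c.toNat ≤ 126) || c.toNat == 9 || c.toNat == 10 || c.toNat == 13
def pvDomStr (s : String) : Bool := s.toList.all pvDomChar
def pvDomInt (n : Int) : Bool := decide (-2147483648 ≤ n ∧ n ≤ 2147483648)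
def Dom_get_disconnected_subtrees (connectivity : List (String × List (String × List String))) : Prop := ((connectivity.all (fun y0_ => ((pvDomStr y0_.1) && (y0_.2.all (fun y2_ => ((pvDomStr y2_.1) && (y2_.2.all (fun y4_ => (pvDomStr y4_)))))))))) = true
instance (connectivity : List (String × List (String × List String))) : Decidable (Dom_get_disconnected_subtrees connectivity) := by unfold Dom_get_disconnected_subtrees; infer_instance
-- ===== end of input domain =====

-- B changes the algorithm, not the result: round-based saturation to a fixpoint instead of A's worklist BFS (objective: simpler).

-- shared accessor: connectivity[t]['incoming'] + connectivity[t]['outgoing'] (getD is safe: Pre_ guarantees the keys exist on every reachable token)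
def pvInOut (d : List (String × List String)) : List String :=
  PySem.Dict.getD (PySem.Dict.ofList d) "incoming" [] ++ PySem.Dict.getD (PySem.Dict.ofList d) "outgoing" []

-- every token either loop can ever add: the keys plus all neighbour tokens (used only as a provably sufficient fuel bound for the while loops)
def pvUniv (conn : PySem.Dict String (List (String × List String))) : List String :=
  conn.keys ++ conn.items.flatMap (fun kd => pvInOut kd.2)

-- ===== PORT A =====
-- A's while loop: pop a pending token (head stands in for the set's arbitrary pop; the connected SET is order-independent),
-- mark it connected, push its not-yet-connected neighbours.  Fuel |pvUniv|+1 suffices: connected grows every iteration.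
def pvBFS (conn : PySem.Dict String (List (String × List String))) :
    Nat → PySem.Set String → PySem.Set String → PySem.Set String
  | 0, _, connected => connected
  | _ + 1, [], connected => connected
  | fuel + 1, t :: rest, connected =>
    let connected' := PySem.Set.add connected t
    let pending' :=
      match conn.get? t with
      | some d =>
          (PySem.Set.ofList (pvInOut d)).foldl
            (fun p x => if PySem.Set.contains connected' x then p else PySem.Set.add p x) rest
      | none => rest
    pvBFS conn fuel pending' connected'

def get_disconnected_subtrees (connectivity : List (String × List (String × List String))) : List String :=
  let conn := PySem.Dict.ofList connectivity
  let allKeys := conn.keys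
  let firstKey := allKeys.headD ""   -- all_keys[0]; the IndexError on an empty dict is outside Pre_
  let connected := pvBFS conn ((pvUniv conn).length + 1)
      (PySem.Set.add PySem.Set.empty firstKey) PySem.Set.empty
  PySem.Set.diff (PySem.Set.ofList allKeys) connected
  -- the assert holds on every input admitted by Pre_

-- ===== PORT B =====
-- one sweep of `for token, edges in connectivity.items(): if token in connected: connected.update(...)`
def pvPass (conn : PySem.Dict String (List (String × List String))) (connected : PySem.Set String) : PySem.Set String :=
  conn.items.foldl
    (fun c kd =>
      if PySem.Set.contains c kd.1 then
        PySem.Set.update (PySem.Set.update c (PySem.Dict.getD (PySem.Dict.ofList kd.2) "incoming" []))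
          (PySem.Dict.getD (PySem.Dict.ofList kd.2) "outgoing" [])
      else c) connected

-- B's `while True` loop: sweep until len(connected) stops growing.  Fuel |pvUniv|+1 suffices: each kept sweep grows the set.
def pvSaturate (conn : PySem.Dict String (List (String × List String))) :
    Nat → PySem.Set String → PySem.Set String
  | 0, c => c
  | fuel + 1, c =>
    let c' := pvPass conn c
    if c'.length = c.length then c' else pvSaturate conn fuel c'

def get_disconnected_subtrees_alt (connectivity : List (String × List (String × List String))) : List String :=
  let conn := PySem.Dict.ofList connectivity
  let keys := conn.keys
  let connected := pvSaturate conn ((pvUniv conn).length + 1)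
      (PySem.Set.add PySem.Set.empty (keys.headD ""))
  PySem.Set.ofList (keys.filter (fun k => !(PySem.Set.contains connected k)))
  -- the assert holds on every input admitted by Pre_

-- ===== PRECONDITION & SPEC =====
-- reachability closure used ONLY to state where the Python returns (A raises KeyError iff a reachable key lacks
-- 'incoming'/'outgoing', IndexError iff the dict is empty, AssertionError iff |keys \ reach| ≥ |reach|):
-- parallel step, iterated |pvUniv| times (distances are below |pvUniv|), unlike either port's sequential loop.
def pvReachStep (conn : PySem.Dict String (List (String × List String))) (S : List String) : List String :=
  PySem.Set.update S (conn.items.flatMap (fun kd => if S.contains kd.1 then pvInOut kd.2 else []))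

def pvReachAux (conn : PySem.Dict String (List (String × List String))) : Nat → List String → List String
  | 0, S => S
  | n + 1, S => pvReachAux conn n (pvReachStep conn S)

def pvReach (connectivity : List (String × List (String × List String))) : List String :=
  let conn := PySem.Dict.ofList connectivity
  pvReachAux conn (pvUniv conn).length [conn.keys.headD ""]

-- Pre_ = exactly the inputs where Python A returns: dict nonempty, every reachable key has both neighbour lists,
-- and the final assert len(disconnected) < len(connected) holds.
def Pre_get_disconnected_subtrees (connectivity : List (String × List (String × List String))) : Prop :=
  connectivity ≠ [] ∧
  (∀ kd ∈ (PySem.Dict.ofList connectivity).items, kd.1 ∈ pvReach connectivity →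
      (PySem.Dict.ofList kd.2).contains "incoming" = true ∧ (PySem.Dict.ofList kd.2).contains "outgoing" = true) ∧
  (PySem.Set.diff (PySem.Set.ofList (PySem.Dict.ofList connectivity).keys) (pvReach connectivity)).length
    < (pvReach connectivity).length

instance (connectivity : List (String × List (String × List String))) : Decidable (Pre_get_disconnected_subtrees connectivity) := by
  unfold Pre_get_disconnected_subtrees; infer_instance

def pvWitness_get_disconnected_subtrees : (List (String × List (String × List String))) :=
  [("a", [("incoming", []), ("outgoing", ["b"])]), ("b", [("incoming", ["a"]), ("outgoing", [])])]

def Spec_get_disconnected_subtrees (connectivity : List (String × List (String × List String))) (out : List String) : Prop := out = get_disconnected_subtrees_alt connectivity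
instance (connectivity : List (String × List (String × List String))) (out : List String) : Decidable (Spec_get_disconnected_subtrees connectivity out) := by unfold Spec_get_disconnected_subtrees; infer_instance

-- ===== CLAIM (what is proved, stated in full; the proofs are below) =====
def Claim_equal_get_disconnected_subtrees : Prop := ∀ (connectivity : List (String × List (String × List String))), Dom_get_disconnected_subtrees connectivity → Pre_get_disconnected_subtrees connectivity → Spec_get_disconnected_subtrees connectivity (get_disconnected_subtrees connectivity)

-- ===== LEMMAS AND PROOFS =====

-- proof-side graph view: the neighbour list of a token, and reachability from the first key
def pvNbrs (conn : PySem.Dict String (List (String × List String))) (t : String) : List String :=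
  match conn.get? t with
  | some d => pvInOut d
  | none => []

def pvGood (conn : PySem.Dict String (List (String × List String))) (first x : String) : Prop :=
  Relation.ReflTransGen (fun a b => b ∈ pvNbrs conn a) first x

lemma pv_nodup_len {l m : List String} (hn : l.Nodup) (hsub : ∀ x ∈ l, x ∈ m) :
    l.length ≤ m.length := (List.subperm_of_subset hn hsub).length_le

lemma pv_full {l m : List String} (hn : l.Nodup) (hsub : ∀ x ∈ l, x ∈ m)
    (hlen : m.length ≤ l.length) : ∀ x ∈ m, x ∈ l := by
  intro x hx
  by_contra hxl
  have h1 : (x :: l).Nodup := List.nodup_cons.2 ⟨hxl, hn⟩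
  have h2 : ∀ y ∈ x :: l, y ∈ m := by
    intro y hy; rcases List.mem_cons.1 hy with rfl | hy; exact hx; exact hsub y hy
  have := pv_nodup_len h1 h2
  simp at this; omega

lemma pv_mem_foldl_add_if (c : PySem.Set String) (l : List String) (p : List String) (y : String) :
    y ∈ l.foldl (fun p x => if PySem.Set.contains c x then p else PySem.Set.add p x) p ↔
      y ∈ p ∨ (y ∈ l ∧ y ∉ c) := by
  induction l generalizing p with
  | nil => simp
  | cons hd tl ih =>
    simp only [List.foldl_cons]
    by_cases h : PySem.Set.contains c hd = true
    · rw [if_pos h, ih]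
      have hd_mem : hd ∈ c := (PySem.Set.contains_iff c hd).1 h
      constructor
      · rintro (h1 | ⟨h1, h2⟩)
        · exact Or.inl h1
        · exact Or.inr ⟨List.mem_cons_of_mem _ h1, h2⟩
      · rintro (h1 | ⟨h1, h2⟩)
        · exact Or.inl h1
        · rcases List.mem_cons.1 h1 with rfl | h1
          · exact absurd hd_mem h2
          · exact Or.inr ⟨h1, h2⟩
    · rw [if_neg h, ih]
      have hd_not : hd ∉ c := fun hm => h ((PySem.Set.contains_iff c hd).2 hm)
      rw [PySem.Set.mem_add]
      constructor
      · rintro ((h1 | rfl) | ⟨h1, h2⟩)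
        · exact Or.inl h1
        · exact Or.inr ⟨List.mem_cons_self, hd_not⟩
        · exact Or.inr ⟨List.mem_cons_of_mem _ h1, h2⟩
      · rintro (h1 | ⟨h1, h2⟩)
        · exact Or.inl (Or.inl h1)
        · rcases List.mem_cons.1 h1 with rfl | h1
          · exact Or.inl (Or.inr rfl)
          · exact Or.inr ⟨h1, h2⟩

lemma pv_nodup_foldl_add_if (c : PySem.Set String) (l : List String) (p : List String)
    (hp : p.Nodup) :
    (l.foldl (fun p x => if PySem.Set.contains c x then p else PySem.Set.add p x) p).Nodup := by
  induction l generalizing p with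
  | nil => exact hp
  | cons hd tl ih =>
    simp only [List.foldl_cons]
    split
    · exact ih p hp
    · exact ih _ (PySem.Set.nodup_add p hd hp)

lemma pv_nbrs_univ (conn : PySem.Dict String (List (String × List String))) (t : String) :
    ∀ b ∈ pvNbrs conn t, b ∈ pvUniv conn := by
  intro b hb
  unfold pvNbrs at hb
  split at hb
  · next d hd =>
    refine List.mem_append_right _ (List.mem_flatMap.2 ⟨(t, d), ?_, hb⟩)
    exact PySem.Dict.mem_items_of_get?_eq_some conn hd
  · simp at hb

lemma pv_bfs_correct (conn : PySem.Dict String (List (String × List String))) (first : String)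
    (fuel : Nat) (pending connected : List String)
    (hPn : pending.Nodup) (hCn : connected.Nodup)
    (hdisj : ∀ x ∈ pending, x ∉ connected)
    (hPU : ∀ x ∈ pending, x ∈ first :: pvUniv conn)
    (hCU : ∀ x ∈ connected, x ∈ first :: pvUniv conn)
    (hPG : ∀ x ∈ pending, pvGood conn first x)
    (hCG : ∀ x ∈ connected, pvGood conn first x)
    (hclosed : ∀ c ∈ connected, ∀ b ∈ pvNbrs conn c, b ∈ connected ∨ b ∈ pending)
    (hfuel : (first :: pvUniv conn).length ≤ fuel + connected.length) :
    (∀ x ∈ pvBFS conn fuel pending connected, pvGood conn first x) ∧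
    (∀ x ∈ connected, x ∈ pvBFS conn fuel pending connected) ∧
    (∀ x ∈ pending, x ∈ pvBFS conn fuel pending connected) ∧
    (∀ c ∈ pvBFS conn fuel pending connected, ∀ b ∈ pvNbrs conn c,
        b ∈ pvBFS conn fuel pending connected) := by
  induction fuel generalizing pending connected with
  | zero =>
    have hfull : ∀ x ∈ first :: pvUniv conn, x ∈ connected := pv_full hCn hCU (by omega)
    have hpend : pending = [] := by
      cases pending with
      | nil => rfl
      | cons t r => exact absurd (hfull t (hPU t (by simp))) (hdisj t (by simp))
    subst hpend
    simp only [pvBFS]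
    refine ⟨hCG, fun x hx => hx, by simp, ?_⟩
    intro c hc b hb
    rcases hclosed c hc b hb with h | h
    · exact h
    · simp at h
  | succ fuel ih =>
    cases pending with
    | nil =>
      simp only [pvBFS]
      refine ⟨hCG, fun x hx => hx, by simp, ?_⟩
      intro c hc b hb
      rcases hclosed c hc b hb with h | h
      · exact h
      · simp at h
    | cons t rest =>
      have hPn0 := List.nodup_cons.1 hPn
      have ht_nc : t ∉ connected := hdisj t (by simp)
      have ht_good : pvGood conn first t := hPG t (by simp)
      have hadd : PySem.Set.add connected t = connected ++ [t] := by
        unfold PySem.Set.add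
        rw [if_neg (by simpa [PySem.Set.contains_iff] using ht_nc)]
      have hmemc' : ∀ y, y ∈ PySem.Set.add connected t ↔ y ∈ connected ∨ y = t :=
        fun y => PySem.Set.mem_add connected t y
      have key : ∃ pending',
          pvBFS conn (fuel + 1) (t :: rest) connected
            = pvBFS conn fuel pending' (PySem.Set.add connected t) ∧
          (∀ y, y ∈ pending' ↔ y ∈ rest ∨ (y ∈ pvNbrs conn t ∧ y ∉ PySem.Set.add connected t)) ∧
          pending'.Nodup := by
        rcases hget : conn.get? t with _ | d
        · refine ⟨rest, ?_, ?_, hPn0.2⟩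
          · simp only [pvBFS, hget]
          · intro y; simp [pvNbrs, hget]
        · refine ⟨(PySem.Set.ofList (pvInOut d)).foldl
              (fun p x => if PySem.Set.contains (PySem.Set.add connected t) x then p
                else PySem.Set.add p x) rest,
            ?_, ?_, pv_nodup_foldl_add_if _ _ _ hPn0.2⟩
          · simp only [pvBFS, hget]
          · intro y
            rw [pv_mem_foldl_add_if]
            simp [pvNbrs, hget, PySem.Set.mem_ofList]
      obtain ⟨pending', hstep, hmem, hPn'⟩ := key
      rw [hstep]
      have hCn' : (PySem.Set.add connected t).Nodup := PySem.Set.nodup_add _ _ hCn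
      have ht_in : t ∈ PySem.Set.add connected t := (hmemc' t).2 (Or.inr rfl)
      have hdisj' : ∀ x ∈ pending', x ∉ PySem.Set.add connected t := by
        intro x hx
        rcases (hmem x).1 hx with hx | ⟨_, hx⟩
        · rw [hmemc']
          rintro (h | rfl)
          · exact hdisj x (List.mem_cons_of_mem _ hx) h
          · exact hPn0.1 hx
        · exact hx
      have hPU' : ∀ x ∈ pending', x ∈ first :: pvUniv conn := by
        intro x hx
        rcases (hmem x).1 hx with hx | ⟨hx, _⟩
        · exact hPU x (List.mem_cons_of_mem _ hx)
        · exact List.mem_cons_of_mem _ (pv_nbrs_univ conn t x hx)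
      have hCU' : ∀ x ∈ PySem.Set.add connected t, x ∈ first :: pvUniv conn := by
        intro x hx
        rcases (hmemc' x).1 hx with hx | hxt
        · exact hCU x hx
        · rw [hxt]; exact hPU t (by simp)
      have hPG' : ∀ x ∈ pending', pvGood conn first x := by
        intro x hx
        rcases (hmem x).1 hx with hx | ⟨hx, _⟩
        · exact hPG x (List.mem_cons_of_mem _ hx)
        · exact Relation.ReflTransGen.tail ht_good hx
      have hCG' : ∀ x ∈ PySem.Set.add connected t, pvGood conn first x := by
        intro x hx
        rcases (hmemc' x).1 hx with hx | hxt
        · exact hCG x hx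
        · rw [hxt]; exact ht_good
      have hclosed' : ∀ c ∈ PySem.Set.add connected t, ∀ b ∈ pvNbrs conn c,
          b ∈ PySem.Set.add connected t ∨ b ∈ pending' := by
        intro c hc b hb
        rcases (hmemc' c).1 hc with hc | hct
        · rcases hclosed c hc b hb with h | h
          · exact Or.inl ((hmemc' b).2 (Or.inl h))
          · rcases List.mem_cons.1 h with rfl | h
            · exact Or.inl ht_in
            · exact Or.inr ((hmem b).2 (Or.inl h))
        · rw [hct] at hb
          by_cases hbc : b ∈ PySem.Set.add connected t
          · exact Or.inl hbc
          · exact Or.inr ((hmem b).2 (Or.inr ⟨hb, hbc⟩))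
      have hfuel' : (first :: pvUniv conn).length ≤ fuel + (PySem.Set.add connected t).length := by
        rw [hadd]; simp only [List.length_append, List.length_cons, List.length_nil]
        simp only [List.length_cons] at hfuel ⊢
        omega
      obtain ⟨ih1, ih2, ih3, ih4⟩ := ih pending' (PySem.Set.add connected t)
        hPn' hCn' hdisj' hPU' hCU' hPG' hCG' hclosed' hfuel'
      refine ⟨ih1, ?_, ?_, ih4⟩
      · intro x hx
        exact ih2 x ((hmemc' x).2 (Or.inl hx))
      · intro x hx
        rcases List.mem_cons.1 hx with rfl | hx
        · exact ih2 x ht_in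
        · exact ih3 x ((hmem x).2 (Or.inl hx))

lemma pv_step_prefix (c : PySem.Set String) (kd : String × List (String × List String)) :
    c <+: (if PySem.Set.contains c kd.1 then
        PySem.Set.update (PySem.Set.update c (PySem.Dict.getD (PySem.Dict.ofList kd.2) "incoming" []))
          (PySem.Dict.getD (PySem.Dict.ofList kd.2) "outgoing" [])
      else c) := by
  split
  · rw [PySem.Set.update_eq_append_filter, PySem.Set.update_eq_append_filter, List.append_assoc]
    exact List.prefix_append c _
  · exact List.prefix_refl c

lemma pv_foldl_prefix (l : List (String × List (String × List String))) (c : PySem.Set String) :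
    c <+: l.foldl
      (fun c kd =>
        if PySem.Set.contains c kd.1 then
          PySem.Set.update (PySem.Set.update c (PySem.Dict.getD (PySem.Dict.ofList kd.2) "incoming" []))
            (PySem.Dict.getD (PySem.Dict.ofList kd.2) "outgoing" [])
        else c) c := by
  induction l generalizing c with
  | nil => exact List.prefix_refl c
  | cons kd tl ih =>
    simp only [List.foldl_cons]
    exact List.IsPrefix.trans (pv_step_prefix c kd) (ih _)

lemma pv_pass_prefix (conn : PySem.Dict String (List (String × List String))) (c : PySem.Set String) :
    c <+: pvPass conn c := pv_foldl_prefix conn.items c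

lemma pv_pass_nodup (conn : PySem.Dict String (List (String × List String))) (c : PySem.Set String)
    (h : c.Nodup) : (pvPass conn c).Nodup := by
  unfold pvPass
  induction conn.items generalizing c with
  | nil => exact h
  | cons kd tl ih =>
    simp only [List.foldl_cons]
    split
    · exact ih _ (PySem.Set.nodup_update _ _ (PySem.Set.nodup_update _ _ h))
    · exact ih _ h

lemma pv_mem_double_update (c : PySem.Set String) (xs ys : List String) (y : String) :
    y ∈ PySem.Set.update (PySem.Set.update c xs) ys ↔ y ∈ c ∨ y ∈ xs ∨ y ∈ ys := by
  rw [PySem.Set.mem_update, PySem.Set.mem_update]; tauto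

lemma pv_inout_split (d : List (String × List String)) (y : String) :
    y ∈ pvInOut d ↔ y ∈ PySem.Dict.getD (PySem.Dict.ofList d) "incoming" []
      ∨ y ∈ PySem.Dict.getD (PySem.Dict.ofList d) "outgoing" [] := by
  unfold pvInOut; exact List.mem_append

lemma pv_foldl_univ (conn : PySem.Dict String (List (String × List String))) (first : String)
    (l : List (String × List (String × List String))) (hsub : ∀ kd ∈ l, kd ∈ conn.items)
    (c : PySem.Set String) (h : ∀ x ∈ c, x ∈ first :: pvUniv conn) :
    ∀ x ∈ l.foldl
      (fun c kd =>
        if PySem.Set.contains c kd.1 then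
          PySem.Set.update (PySem.Set.update c (PySem.Dict.getD (PySem.Dict.ofList kd.2) "incoming" []))
            (PySem.Dict.getD (PySem.Dict.ofList kd.2) "outgoing" [])
        else c) c, x ∈ first :: pvUniv conn := by
  induction l generalizing c with
  | nil => exact h
  | cons kd tl ih =>
    simp only [List.foldl_cons]
    apply ih (fun kd' h' => hsub kd' (List.mem_cons_of_mem _ h'))
    intro x hx
    split at hx
    · rcases (pv_mem_double_update c _ _ x).1 hx with hx | hx | hx
      · exact h x hx
      · refine List.mem_cons_of_mem _ (List.mem_append_right _ (List.mem_flatMap.2 ⟨kd, hsub kd (by simp), ?_⟩))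
        exact (pv_inout_split kd.2 x).2 (Or.inl hx)
      · refine List.mem_cons_of_mem _ (List.mem_append_right _ (List.mem_flatMap.2 ⟨kd, hsub kd (by simp), ?_⟩))
        exact (pv_inout_split kd.2 x).2 (Or.inr hx)
    · exact h x hx

lemma pv_pass_univ (conn : PySem.Dict String (List (String × List String))) (first : String)
    (c : PySem.Set String) (h : ∀ x ∈ c, x ∈ first :: pvUniv conn) :
    ∀ x ∈ pvPass conn c, x ∈ first :: pvUniv conn :=
  pv_foldl_univ conn first conn.items (fun _ h => h) c h

lemma pv_update_eq_mem {c : PySem.Set String} {xs : List String}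
    (h : PySem.Set.update c xs = c) : ∀ b ∈ xs, b ∈ c := by
  intro b hb
  have : b ∈ PySem.Set.update c xs := (PySem.Set.mem_update c xs b).2 (Or.inr hb)
  rwa [h] at this

lemma pv_foldl_good (conn : PySem.Dict String (List (String × List String))) (first : String)
    (hnk : conn.keys.Nodup)
    (l : List (String × List (String × List String))) (hsub : ∀ kd ∈ l, kd ∈ conn.items)
    (c : PySem.Set String) (h : ∀ x ∈ c, pvGood conn first x) :
    ∀ x ∈ l.foldl
      (fun c kd =>
        if PySem.Set.contains c kd.1 then
          PySem.Set.update (PySem.Set.update c (PySem.Dict.getD (PySem.Dict.ofList kd.2) "incoming" []))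
            (PySem.Dict.getD (PySem.Dict.ofList kd.2) "outgoing" [])
        else c) c, pvGood conn first x := by
  induction l generalizing c with
  | nil => exact h
  | cons kd tl ih =>
    simp only [List.foldl_cons]
    apply ih (fun kd' h' => hsub kd' (List.mem_cons_of_mem _ h'))
    intro x hx
    by_cases hck : PySem.Set.contains c kd.1 = true
    · rw [if_pos hck] at hx
      have hkdG : pvGood conn first kd.1 := h kd.1 ((PySem.Set.contains_iff c kd.1).1 hck)
      have hget : conn.get? kd.1 = some kd.2 := by
        have := hsub kd (by simp)
        exact PySem.Dict.get?_of_mem_items conn (by exact this) hnk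
      have hnbr : ∀ b, b ∈ pvInOut kd.2 → pvGood conn first b := by
        intro b hb
        refine Relation.ReflTransGen.tail hkdG ?_
        simp [pvNbrs, hget, hb]
      rcases (pv_mem_double_update c _ _ x).1 hx with hx | hx | hx
      · exact h x hx
      · exact hnbr x ((pv_inout_split kd.2 x).2 (Or.inl hx))
      · exact hnbr x ((pv_inout_split kd.2 x).2 (Or.inr hx))
    · rw [if_neg hck] at hx
      exact h x hx

lemma pv_pass_good (conn : PySem.Dict String (List (String × List String))) (first : String)
    (hnk : conn.keys.Nodup)
    (c : PySem.Set String) (h : ∀ x ∈ c, pvGood conn first x) :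
    ∀ x ∈ pvPass conn c, pvGood conn first x :=
  pv_foldl_good conn first hnk conn.items (fun _ h => h) c h

lemma pv_foldl_fix (l : List (String × List (String × List String)))
    (c : PySem.Set String)
    (hfix : l.foldl
      (fun c kd =>
        if PySem.Set.contains c kd.1 then
          PySem.Set.update (PySem.Set.update c (PySem.Dict.getD (PySem.Dict.ofList kd.2) "incoming" []))
            (PySem.Dict.getD (PySem.Dict.ofList kd.2) "outgoing" [])
        else c) c = c) :
    ∀ kd ∈ l, kd.1 ∈ c → ∀ b ∈ pvInOut kd.2, b ∈ c := by
  induction l generalizing c with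
  | nil => simp
  | cons kd tl ih =>
    simp only [List.foldl_cons] at hfix
    -- the first step is already the identity
    have hpre1 := pv_step_prefix c kd
    have hpre2 := pv_foldl_prefix tl (if PySem.Set.contains c kd.1 then
        PySem.Set.update (PySem.Set.update c (PySem.Dict.getD (PySem.Dict.ofList kd.2) "incoming" []))
          (PySem.Dict.getD (PySem.Dict.ofList kd.2) "outgoing" [])
      else c)
    rw [hfix] at hpre2
    have hstep_eq : (if PySem.Set.contains c kd.1 then
        PySem.Set.update (PySem.Set.update c (PySem.Dict.getD (PySem.Dict.ofList kd.2) "incoming" []))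
          (PySem.Dict.getD (PySem.Dict.ofList kd.2) "outgoing" [])
      else c) = c := by
      have h1 := hpre1.length_le
      have h2 := hpre2.length_le
      exact (hpre2.eq_of_length (by omega)).symm ▸ (hpre2.eq_of_length (by omega))
    intro kd' hkd' hk1 b hb
    rcases List.mem_cons.1 hkd' with rfl | hkd'
    · -- the head item: its updates added nothing
      rw [if_pos ((PySem.Set.contains_iff c kd'.1).2 hk1)] at hstep_eq
      have hpu1 : c <+: PySem.Set.update c (PySem.Dict.getD (PySem.Dict.ofList kd'.2) "incoming" []) := by
        rw [PySem.Set.update_eq_append_filter]; exact List.prefix_append c _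
      have hpu2 : PySem.Set.update c (PySem.Dict.getD (PySem.Dict.ofList kd'.2) "incoming" []) <+:
          PySem.Set.update (PySem.Set.update c (PySem.Dict.getD (PySem.Dict.ofList kd'.2) "incoming" []))
            (PySem.Dict.getD (PySem.Dict.ofList kd'.2) "outgoing" []) := by
        rw [PySem.Set.update_eq_append_filter
          (PySem.Set.update c (PySem.Dict.getD (PySem.Dict.ofList kd'.2) "incoming" []))]
        exact List.prefix_append _ _
      have hu1_eq : PySem.Set.update c (PySem.Dict.getD (PySem.Dict.ofList kd'.2) "incoming" []) = c := by
        have h1 := hpu1.length_le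
        have h2 := (hstep_eq ▸ hpu2).length_le
        exact ((hstep_eq ▸ hpu2).eq_of_length (by omega))
      have hinc := pv_update_eq_mem hu1_eq
      have hout : PySem.Set.update c (PySem.Dict.getD (PySem.Dict.ofList kd'.2) "outgoing" []) = c := by
        rw [hu1_eq] at hstep_eq
        exact hstep_eq
      rcases (pv_inout_split kd'.2 b).1 hb with hb | hb
      · exact hinc b hb
      · exact pv_update_eq_mem hout b hb
    · rw [hstep_eq] at hfix
      exact ih c hfix kd' hkd' hk1 b hb

lemma pv_pass_fix_closed (conn : PySem.Dict String (List (String × List String)))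
    (c : PySem.Set String) (hfix : pvPass conn c = c) :
    ∀ t ∈ c, ∀ b ∈ pvNbrs conn t, b ∈ c := by
  intro t ht b hb
  unfold pvNbrs at hb
  split at hb
  · next d hget =>
    exact pv_foldl_fix conn.items c hfix (t, d)
      (PySem.Dict.mem_items_of_get?_eq_some conn hget) ht b hb
  · simp at hb

lemma pv_saturate_correct (conn : PySem.Dict String (List (String × List String))) (first : String)
    (hnk : conn.keys.Nodup) (fuel : Nat) (c : PySem.Set String)
    (hn : c.Nodup) (hU : ∀ x ∈ c, x ∈ first :: pvUniv conn) (hG : ∀ x ∈ c, pvGood conn first x)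
    (hfuel : (first :: pvUniv conn).length ≤ fuel + c.length) :
    (∀ x ∈ c, x ∈ pvSaturate conn fuel c) ∧
    (∀ x ∈ pvSaturate conn fuel c, pvGood conn first x) ∧
    pvPass conn (pvSaturate conn fuel c) = pvSaturate conn fuel c := by
  induction fuel generalizing c with
  | zero =>
    have hfull : ∀ x ∈ first :: pvUniv conn, x ∈ c := pv_full hn hU (by omega)
    have hfix : pvPass conn c = c := by
      obtain ⟨e, he⟩ := pv_pass_prefix conn c
      have hnd : (pvPass conn c).Nodup := pv_pass_nodup conn c hn
      cases e with
      | nil => rw [← he, List.append_nil]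
      | cons y ys =>
        exfalso
        have hy : y ∈ pvPass conn c := by rw [← he]; simp
        have hyc : y ∈ c := hfull y (pv_pass_univ conn first c hU y hy)
        rw [← he] at hnd
        exact (List.disjoint_of_nodup_append hnd) hyc (by simp)
    simp only [pvSaturate]
    exact ⟨fun x hx => hx, hG, hfix⟩
  | succ fuel ih =>
    obtain ⟨e, he⟩ := pv_pass_prefix conn c
    have hn' := pv_pass_nodup conn c hn
    have hU' := pv_pass_univ conn first c hU
    have hG' := pv_pass_good conn first hnk c hG
    have hlc := congrArg List.length he
    rw [List.length_append] at hlc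
    by_cases hlen : (pvPass conn c).length = c.length
    · have he0 : pvPass conn c = c := by
        have hez : e.length = 0 := by omega
        rw [← he, List.length_eq_zero_iff.1 hez, List.append_nil]
      have hres : pvSaturate conn (fuel + 1) c = pvPass conn c := by
        simp only [pvSaturate]
        rw [if_pos hlen]
      rw [hres, he0]
      exact ⟨fun x hx => hx, hG, he0⟩
    · have hres : pvSaturate conn (fuel + 1) c = pvSaturate conn fuel (pvPass conn c) := by
        simp only [pvSaturate]
        rw [if_neg hlen]
      have hgrow : c.length + 1 ≤ (pvPass conn c).length := by
        cases e with
        | nil => simp at hlc; exact absurd (by omega) hlen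
        | cons y ys => simp at hlc; omega
      obtain ⟨s1, s2, s3⟩ := ih (pvPass conn c) hn' hU' hG' (by omega)
      rw [hres]
      exact ⟨fun x hx => s1 x (by rw [← he]; exact List.mem_append_left _ hx), s2, s3⟩

lemma pv_init_singleton (s : String) : PySem.Set.add ([] : List String) s = [s] := rfl

lemma pv_empty_nil : (PySem.Set.empty : PySem.Set String) = [] := rfl


lemma pv_final_eq (connectivity : List (String × List (String × List String))) :
    get_disconnected_subtrees connectivity = get_disconnected_subtrees_alt connectivity := by
  unfold get_disconnected_subtrees get_disconnected_subtrees_alt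
  simp only [pv_empty_nil, pv_init_singleton]
  generalize hconn : PySem.Dict.ofList connectivity = conn
  generalize hfirst : conn.keys.headD "" = first
  have hnk : conn.keys.Nodup := by rw [← hconn]; exact PySem.Dict.nodup_keys_ofList connectivity
  have hUlen : (first :: pvUniv conn).length = (pvUniv conn).length + 1 := by simp
  -- BFS side
  obtain ⟨a1, a2, a3, a4⟩ := pv_bfs_correct conn first ((pvUniv conn).length + 1) [first] []
    (by simp) (by simp) (by simp) (by simp)
    (by simp) (by intro x hx; simp at hx; subst hx; exact Relation.ReflTransGen.refl) (by simp) (by simp) (by omega)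
  have hAiff : ∀ x, x ∈ pvBFS conn ((pvUniv conn).length + 1) [first] [] ↔ pvGood conn first x := by
    intro x
    constructor
    · exact a1 x
    · intro h
      induction h with
      | refl => exact a3 first (by simp)
      | tail h1 h2 ih => exact a4 _ ih _ h2
  -- saturation side
  obtain ⟨s1, s2, s3⟩ := pv_saturate_correct conn first hnk ((pvUniv conn).length + 1) [first]
    (by simp) (by simp) (by intro x hx; simp at hx; subst hx; exact Relation.ReflTransGen.refl) (by omega)
  have hBiff : ∀ x, x ∈ pvSaturate conn ((pvUniv conn).length + 1) [first] ↔ pvGood conn first x := by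
    intro x
    constructor
    · exact s2 x
    · intro h
      induction h with
      | refl => exact s1 first (by simp)
      | tail h1 h2 ih => exact pv_pass_fix_closed conn _ s3 _ ih _ h2
  have hcont : ∀ x, PySem.Set.contains (pvBFS conn ((pvUniv conn).length + 1) [first] []) x
      = PySem.Set.contains (pvSaturate conn ((pvUniv conn).length + 1) [first]) x := by
    intro x
    have h : PySem.Set.contains (pvBFS conn ((pvUniv conn).length + 1) [first] []) x = true
        ↔ PySem.Set.contains (pvSaturate conn ((pvUniv conn).length + 1) [first]) x = true := by
      rw [PySem.Set.contains_iff, PySem.Set.contains_iff, hAiff, hBiff]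
    exact Bool.eq_iff_iff.2 h
  rw [PySem.Set.ofList_eq_self_of_nodup _ hnk]
  rw [PySem.Set.ofList_eq_self_of_nodup _ ((List.Nodup.filter _ hnk))]
  unfold PySem.Set.diff
  apply List.filter_congr
  intro x _
  rw [hcont x]

-- ===== VERDICT (by name: the statement is the Claim_ definition above) =====
theorem get_disconnected_subtrees_spec : Claim_equal_get_disconnected_subtrees := by
  intro connectivity _ _
  unfold Spec_get_disconnected_subtrees
  exact pv_final_eq connectivity
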